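-- pv_equiv track=rewrite | github.com/hassan12ammar/maze-solver-AI | main.py | get_min_distance_value
-- ===== SOURCE A (Python) =====
-- def get_min_distance_value(move_list,END_X,END_Y):
--     distance_values_list = []
--     if len(move_list)>0:
--         for move in range(len(move_list)):
--             move_value = move_list[move][0]
--             distance_value = abs((move_value[0]-END_X)+(move_value[1]-END_Y))
--             distance_values_list.append(distance_value)
--     minimum_value = min(distance_values_list)
--     return distance_values_list.index(minimum_value)
-- ===== SOURCE B (Python) =====
-- def get_min_distance_value(move_list, END_X, END_Y):
--     best_index = None
--     best_distance = None
--     for i, move in enumerate(move_list):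
--         point = move[0]
--         d = abs((point[0] - END_X) + (point[1] - END_Y))
--         if best_distance is None or d < best_distance:
--             best_index, best_distance = i, d
--     if best_index is None:
--         raise ValueError("get_min_distance_value() arg is an empty sequence")
--     return best_index
-- ===== Notes on version B (the rewrite author's own statement) =====
-- stated objective: simpler
-- what changed: Replaced the three-pass structure (build a distance list, min() over it, then .index() to re-scan for the minimum) by one argmin loop that tracks the best index and best distance as it goes, building no intermediate list.
import Mathlib
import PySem

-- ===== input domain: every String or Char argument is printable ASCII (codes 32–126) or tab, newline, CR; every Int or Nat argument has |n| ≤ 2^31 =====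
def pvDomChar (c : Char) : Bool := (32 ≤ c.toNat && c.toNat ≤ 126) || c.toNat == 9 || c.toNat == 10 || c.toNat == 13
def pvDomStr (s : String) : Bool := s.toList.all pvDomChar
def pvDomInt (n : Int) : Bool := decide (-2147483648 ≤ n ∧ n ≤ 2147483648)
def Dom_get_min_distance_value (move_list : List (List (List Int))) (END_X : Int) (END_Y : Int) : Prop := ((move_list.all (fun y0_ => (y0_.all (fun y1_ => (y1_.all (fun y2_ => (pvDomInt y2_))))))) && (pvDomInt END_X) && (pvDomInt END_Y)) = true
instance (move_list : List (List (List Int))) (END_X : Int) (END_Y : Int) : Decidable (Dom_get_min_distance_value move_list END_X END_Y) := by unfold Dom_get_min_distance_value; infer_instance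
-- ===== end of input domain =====

-- B replaces A's three passes (build distance list, min(), .index()) by one argmin loop; objective: simpler.


-- ===== PORT A =====
-- A: build distance_values_list with an index loop, then min(), then .index() of that minimum.
def get_min_distance_value (move_list : List (List (List Int))) (END_X : Int) (END_Y : Int) : Int :=
  let distance_values_list : List Int :=
    if move_list.length > 0 then
      (PySem.List.pyRange 0 (move_list.length : Int) 1).foldl
        (fun acc move =>
          let move_value := (PySem.List.pyGetD move_list move []).getD 0 []
          let distance_value := |(move_value.getD 0 0 - END_X) + (move_value.getD 1 0 - END_Y)|
          acc ++ [distance_value]) []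
    else []
  let minimum_value := (PySem.List.min? distance_values_list (fun x => x)).getD 0
  ((PySem.List.index? distance_values_list minimum_value).getD 0 : Nat)

-- ===== PORT B =====
-- B: one argmin pass over enumerate(move_list), tracking (best_index, best_distance).
-- pvStepB is the loop body of Source B (update best on a strict improvement).
def pvStepB (END_X END_Y : Int) (best : Option (Int × Int)) (p : Int × List (List Int)) : Option (Int × Int) :=
  let point := p.2.getD 0 []
  let d := |(point.getD 0 0 - END_X) + (point.getD 1 0 - END_Y)|
  match best with
  | none => some (p.1, d)
  | some (bi, bd) => if d < bd then some (p.1, d) else some (bi, bd)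

-- Python B raises ValueError on an empty move_list; the port returns 0 there (outside Pre_).
def get_min_distance_value_alt (move_list : List (List (List Int))) (END_X : Int) (END_Y : Int) : Int :=
  let best := (PySem.List.enumerate move_list 0).foldl (pvStepB END_X END_Y) none
  match best with
  | none => 0
  | some (bi, _) => bi

-- ===== PRECONDITION & SPEC =====
-- Pre_ excludes exactly the inputs where A raises: the empty move_list (ValueError from min([]))
-- and moves whose first point has fewer than 2 coordinates or no point at all (IndexError).
def Pre_get_min_distance_value (move_list : List (List (List Int))) (END_X : Int) (END_Y : Int) : Prop :=
  move_list ≠ [] ∧ ∀ m ∈ move_list, 2 ≤ (m.getD 0 []).length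
instance (move_list : List (List (List Int))) (END_X : Int) (END_Y : Int) : Decidable (Pre_get_min_distance_value move_list END_X END_Y) := by unfold Pre_get_min_distance_value; infer_instance

def pvWitness_get_min_distance_value : List (List (List Int)) × Int × Int := ([[[1, 2]], [[0, 0]]], 3, 4)

def Spec_get_min_distance_value (move_list : List (List (List Int))) (END_X : Int) (END_Y : Int) (out : Int) : Prop := out = get_min_distance_value_alt move_list END_X END_Y
instance (move_list : List (List (List Int))) (END_X : Int) (END_Y : Int) (out : Int) : Decidable (Spec_get_min_distance_value move_list END_X END_Y out) := by unfold Spec_get_min_distance_value; infer_instance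

-- ===== CLAIM (what is proved, stated in full; the proofs are below) =====
def Claim_equal_get_min_distance_value : Prop := ∀ (move_list : List (List (List Int))) (END_X : Int) (END_Y : Int), Dom_get_min_distance_value move_list END_X END_Y → Pre_get_min_distance_value move_list END_X END_Y → Spec_get_min_distance_value move_list END_X END_Y (get_min_distance_value move_list END_X END_Y)

-- ===== LEMMAS AND PROOFS =====

-- the per-move distance both programs compute
def pvD (END_X END_Y : Int) (m : List (List Int)) : Int :=
  |((m.getD 0 []).getD 0 0 - END_X) + ((m.getD 0 []).getD 1 0 - END_Y)|

-- recursive argmin spec: first strict-improvement chain, tracking (index, value)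
def pvAm (k bi bd : Int) : List Int → Int × Int
  | [] => (bi, bd)
  | d :: ds => if d < bd then pvAm (k + 1) k d ds else pvAm (k + 1) bi bd ds

theorem pv_foldl_append (f : List (List Int) → Int) :
    ∀ (l : List (List (List Int))) (init : List Int),
      l.foldl (fun acc x => acc ++ [f x]) init = init ++ l.map f := by
  intro l
  induction l with
  | nil => intro init; simp
  | cons x t ih => intro init; simp [List.foldl_cons, ih]

theorem pvB_fold (END_X END_Y : Int) :
    ∀ (l : List (List (List Int))) (s : Int) (bi bd : Int),
      (PySem.List.enumerate l s).foldl (pvStepB END_X END_Y) (some (bi, bd))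
      = some (pvAm s bi bd (l.map (pvD END_X END_Y))) := by
  intro l
  induction l with
  | nil => intro s bi bd; simp [PySem.List.enumerate_nil, pvAm]
  | cons m t ih =>
      intro s bi bd
      rw [PySem.List.enumerate_cons]
      simp only [List.foldl_cons, List.map_cons, pvAm, pvStepB, pvD]
      by_cases h : |((m.getD 0 []).getD 0 0 - END_X) + ((m.getD 0 []).getD 1 0 - END_Y)| < bd
      · rw [if_pos h, if_pos h]; exact ih (s + 1) s _
      · rw [if_neg h, if_neg h]; exact ih (s + 1) bi bd

theorem pvAm_char (ds : List Int) :
    ∀ (k bi bd : Int),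
      pvAm k bi bd ds =
        if ∃ d ∈ ds, d < bd then
          (k + (((PySem.List.index? ds (ds.foldl min bd)).getD 0 : Nat) : Int), ds.foldl min bd)
        else (bi, bd) := by
  induction ds with
  | nil => intro k bi bd; simp [pvAm]
  | cons d ds ih =>
      intro k bi bd
      have hmins : (d :: ds).foldl min bd = ds.foldl min (min bd d) := rfl
      by_cases hd : d < bd
      · have hmin : min bd d = d := min_eq_right (le_of_lt hd)
        have hex : ∃ e ∈ d :: ds, e < bd := ⟨d, List.mem_cons_self, hd⟩
        simp only [pvAm, if_pos hd, if_pos hex, ih, hmins, hmin]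
        by_cases hex2 : ∃ e ∈ ds, e < d
        · -- minimum is strictly inside ds
          obtain ⟨e, he, hlt⟩ := hex2
          have hle : ds.foldl min d ≤ e := (PySem.List.foldl_min_le ds d).2 e he
          have hne : d ≠ ds.foldl min d := by omega
          rw [if_pos ⟨e, he, hlt⟩, PySem.List.index?_cons_of_ne _ hne]
          have hsome : (PySem.List.index? ds (ds.foldl min d)).isSome := by
            rw [PySem.List.index?_isSome_iff]
            rcases (PySem.List.foldl_min_mem ds d) with h | h
            · omega
            · exact h
          obtain ⟨j, hj⟩ := Option.isSome_iff_exists.mp hsome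
          rw [hj]
          simp [Prod.ext_iff]
          omega
        · -- d is the minimum: foldl min d ds = d
          push_neg at hex2
          have h1 : ds.foldl min d ≤ d := (PySem.List.foldl_min_le ds d).1
          have h2 : ds.foldl min d = d := by
            rcases (PySem.List.foldl_min_mem ds d) with h | h
            · exact h
            · have := hex2 _ h; omega
          rw [if_neg (by push_neg; intro e he; have := hex2 e he; omega)]
          rw [h2, PySem.List.index?_cons_self]
          simp
      · have hmin : min bd d = bd := min_eq_left (by omega)
        simp only [pvAm, if_neg hd, ih, hmins, hmin]
        have hiff : (∃ e ∈ d :: ds, e < bd) ↔ (∃ e ∈ ds, e < bd) := by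
          constructor
          · rintro ⟨e, he, hlt⟩
            rcases List.mem_cons.mp he with rfl | he'
            · omega
            · exact ⟨e, he', hlt⟩
          · rintro ⟨e, he, hlt⟩; exact ⟨e, List.mem_cons_of_mem _ he, hlt⟩
        by_cases hex : ∃ e ∈ ds, e < bd
        · obtain ⟨e, he, hlt⟩ := hex
          have hle : ds.foldl min bd ≤ e := (PySem.List.foldl_min_le ds bd).2 e he
          have hne : d ≠ ds.foldl min bd := by omega
          rw [if_pos ((hiff).mpr ⟨e, he, hlt⟩), if_pos ⟨e, he, hlt⟩,
            PySem.List.index?_cons_of_ne _ hne]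
          have hsome : (PySem.List.index? ds (ds.foldl min bd)).isSome := by
            rw [PySem.List.index?_isSome_iff]
            rcases (PySem.List.foldl_min_mem ds bd) with h | h
            · have := (PySem.List.foldl_min_le ds bd).1; omega
            · exact h
          obtain ⟨j, hj⟩ := Option.isSome_iff_exists.mp hsome
          rw [hj]
          simp [Prod.ext_iff]
          omega
        · rw [if_neg (fun h => hex (hiff.mp h)), if_neg hex]

theorem pvB_fold_start (END_X END_Y : Int) (m : List (List Int)) (t : List (List (List Int))) :
    get_min_distance_value_alt (m :: t) END_X END_Y
      = (pvAm 1 0 (pvD END_X END_Y m) (t.map (pvD END_X END_Y))).1 := by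
  unfold get_min_distance_value_alt
  simp only [PySem.List.enumerate_cons, List.foldl_cons, zero_add]
  rw [show pvStepB END_X END_Y none (0, m) = some ((0 : Int), pvD END_X END_Y m) from rfl]
  rw [pvB_fold END_X END_Y t 1 0 (pvD END_X END_Y m)]

theorem pvA_list (END_X END_Y : Int) (m : List (List Int)) (t : List (List (List Int))) :
    (PySem.List.pyRange 0 (((m :: t).length : Int)) 1).foldl
      (fun acc move =>
        let move_value := (PySem.List.pyGetD (m :: t) move []).getD 0 []
        let distance_value := |(move_value.getD 0 0 - END_X) + (move_value.getD 1 0 - END_Y)|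
        acc ++ [distance_value]) []
    = (m :: t).map (pvD END_X END_Y) := by
  show (PySem.List.pyRange 0 (PySem.List.len (m :: t)) 1).foldl
      (fun acc j => acc ++ [pvD END_X END_Y (PySem.List.pyGetD (m :: t) j [])]) [] = _
  have h := PySem.List.foldl_pyRange_zero_pyGetD (m :: t) ([] : List (List Int))
    (fun acc mv => acc ++ [pvD END_X END_Y mv]) ([] : List Int)
  rw [h, pv_foldl_append (pvD END_X END_Y) (m :: t) []]
  simp

-- ===== VERDICT (by name: the statement is the Claim_ definition above) =====
theorem get_min_distance_value_spec : Claim_equal_get_min_distance_value := by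
  intro move_list END_X END_Y _ hpre
  obtain ⟨hne, _⟩ := hpre
  obtain ⟨m, t, rfl⟩ := List.exists_cons_of_ne_nil hne
  unfold Spec_get_min_distance_value get_min_distance_value
  have hlen : (m :: t).length > 0 := by simp
  rw [if_pos hlen]
  rw [pvA_list END_X END_Y m t]
  rw [pvB_fold_start]
  simp only [List.map_cons]
  rw [PySem.List.min?_id_cons]
  rw [pvAm_char]
  by_cases hex : ∃ e ∈ t.map (pvD END_X END_Y), e < pvD END_X END_Y m
  · obtain ⟨e, he, hlt⟩ := hex
    have hle := ((PySem.List.foldl_min_le (t.map (pvD END_X END_Y)) (pvD END_X END_Y m)).2 e he)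
    have hne2 : pvD END_X END_Y m ≠ (t.map (pvD END_X END_Y)).foldl min (pvD END_X END_Y m) := by omega
    rw [if_pos ⟨e, he, hlt⟩]
    simp only [Option.getD_some]
    rw [PySem.List.index?_cons_of_ne _ hne2]
    have hsome : (PySem.List.index? (t.map (pvD END_X END_Y)) ((t.map (pvD END_X END_Y)).foldl min (pvD END_X END_Y m))).isSome := by
      rw [PySem.List.index?_isSome_iff]
      rcases (PySem.List.foldl_min_mem (t.map (pvD END_X END_Y)) (pvD END_X END_Y m)) with h | h
      · omega
      · exact h
    obtain ⟨j, hj⟩ := Option.isSome_iff_exists.mp hsome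
    rw [hj]
    simp
    omega
  · push_neg at hex
    have h1 := (PySem.List.foldl_min_le (t.map (pvD END_X END_Y)) (pvD END_X END_Y m)).1
    have h2 : (t.map (pvD END_X END_Y)).foldl min (pvD END_X END_Y m) = pvD END_X END_Y m := by
      rcases (PySem.List.foldl_min_mem (t.map (pvD END_X END_Y)) (pvD END_X END_Y m)) with h | h
      · exact h
      · have := hex _ h; omega
    rw [if_neg (by push_neg; intro e he; have := hex e he; omega)]
    simp only [Option.getD_some]
    rw [h2, PySem.List.index?_cons_self]
    simp
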